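-- pv_equiv track=rewrite | github.com/OpenEvel/picture-cutter | utils.py | lens_segments
-- ===== SOURCE A (Python) =====
-- def lens_segments(seq, black = 0):
--     lens_white = [0]
--
--     before_color = seq[0]
--
--     if before_color > black:
--         lens_white[-1] += 1
--         i_last_white = 0
--     else:
--         i_last_white = -1
--
--     for i in range(1, len(seq)):
--         cur_color = seq[i]
--         if cur_color > black:
--             if before_color > black:
--                 lens_white[-1] += 1
--             else:
--                 if i_last_white - i == 2:
--                      lens_white[-1] += 2
--                 else:
--                     lens_white.append(1)
--                 i_last_white = i
--
--         before_color = cur_color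
--
--     return lens_white
-- ===== SOURCE B (Python) =====
-- def lens_segments(seq, black=0):
--     # two-pointer run scanner: jump over each maximal white run at once
--     res = [] if seq[0] > black else [0]
--     i, n = 0, len(seq)
--     while i < n:
--         if seq[i] > black:
--             j = i + 1
--             while j < n and seq[j] > black:
--                 j += 1
--             res.append(j - i)
--             i = j
--         else:
--             i += 1
--     return res
-- ===== Notes on version B (the rewrite author's own statement) =====
-- stated objective: alternative
-- what changed: Replaces A's element-by-element state machine (before_color flag, dead i_last_white bookkeeping, incrementing the last list cell) with a two-pointer scanner that finds each maximal white run in one inner jump and appends its length once.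
import Mathlib
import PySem

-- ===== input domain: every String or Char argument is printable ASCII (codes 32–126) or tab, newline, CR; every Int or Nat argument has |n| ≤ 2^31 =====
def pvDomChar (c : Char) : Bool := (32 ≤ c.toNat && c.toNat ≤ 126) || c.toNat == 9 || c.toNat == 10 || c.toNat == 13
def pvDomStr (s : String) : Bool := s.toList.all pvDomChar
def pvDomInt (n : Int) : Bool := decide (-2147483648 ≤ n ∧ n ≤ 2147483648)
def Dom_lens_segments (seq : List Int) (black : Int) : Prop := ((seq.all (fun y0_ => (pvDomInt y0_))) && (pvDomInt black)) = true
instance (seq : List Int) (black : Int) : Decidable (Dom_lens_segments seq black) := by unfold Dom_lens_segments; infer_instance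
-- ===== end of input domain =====

-- B replaces A's per-element state machine by a two-pointer run scanner; same values, same cost (objective: alternative).
-- Both A and B raise IndexError on the empty list (seq[0]); Pre_ excludes exactly that.

-- ===== PORT A =====
-- lens_white[-1] += n on the (always nonempty) accumulator list
def incLast : List Int → Int → List Int
  | [], _ => []
  | [x], n => [x + n]
  | x :: y :: ys, n => x :: incLast (y :: ys) n

-- the body of A's `for i in range(1, len(seq))` loop, state = (lens_white, before_color, i_last_white)
def aStep (seq : List Int) (black : Int) (st : List Int × Int × Int) (i : Int) : List Int × Int × Int :=
  let lens_white := st.1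
  let before_color := st.2.1
  let i_last_white := st.2.2
  let cur_color := PySem.List.pyGetD seq i 0   -- i is always in range here
  if cur_color > black then
    if before_color > black then (incLast lens_white 1, cur_color, i_last_white)
    else if i_last_white - i == 2 then (incLast lens_white 2, cur_color, i)
    else (lens_white ++ [1], cur_color, i)
  else (lens_white, cur_color, i_last_white)

def lens_segments (seq : List Int) (black : Int) : List Int :=
  match PySem.List.pyGet? seq 0 with
  | none => []   -- first-element access raises IndexError on the empty list; excluded by Pre_
  | some before_color =>
    let init : List Int × Int × Int :=
      if before_color > black then (incLast [0] 1, before_color, 0)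
      else ([0], before_color, -1)
    ((PySem.List.pyRange 1 (PySem.List.len seq) 1).foldl (aStep seq black) init).1

-- ===== PORT B =====
-- inner `while j < n and seq[j] > black: j += 1`
def bScan (seq : List Int) (black : Int) (j : Nat) : Nat :=
  if h : j < seq.length then
    if seq[j] > black then bScan seq black (j + 1) else j
  else j
termination_by seq.length - j

theorem bScan_ge (seq : List Int) (black : Int) (j : Nat) : j ≤ bScan seq black j := by
  fun_induction bScan with
  | case1 j h hw ih => omega
  | case2 j h hw => omega
  | case3 j h => omega

-- outer `while i < n` loop of B
def bLoop (seq : List Int) (black : Int) (res : List Int) (i : Nat) : List Int :=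
  if h : i < seq.length then
    if seq[i] > black then
      let j := bScan seq black (i + 1)
      bLoop seq black (res ++ [(j : Int) - (i : Int)]) j
    else bLoop seq black res (i + 1)
  else res
termination_by seq.length - i
decreasing_by
  · have := bScan_ge seq black (i + 1); omega
  · omega

def lens_segments_alt (seq : List Int) (black : Int) : List Int :=
  match PySem.List.pyGet? seq 0 with
  | none => []   -- first-element access raises IndexError on the empty list; excluded by Pre_
  | some x => bLoop seq black (if x > black then [] else [0]) 0

-- ===== PRECONDITION & SPEC =====
-- A (and B) read the first element: the empty list raises IndexError in both; nothing else raises.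
def Pre_lens_segments (seq : List Int) (black : Int) : Prop := seq ≠ []
instance (seq : List Int) (black : Int) : Decidable (Pre_lens_segments seq black) := by unfold Pre_lens_segments; infer_instance
def pvWitness_lens_segments : List Int × Int := ([1, 0, 2, 3], 0)

def Spec_lens_segments (seq : List Int) (black : Int) (out : List Int) : Prop := out = lens_segments_alt seq black
instance (seq : List Int) (black : Int) (out : List Int) : Decidable (Spec_lens_segments seq black out) := by unfold Spec_lens_segments; infer_instance

-- ===== CLAIM (what is proved, stated in full; the proofs are below) =====
def Claim_equal_lens_segments : Prop := ∀ (seq : List Int) (black : Int), Dom_lens_segments seq black → Pre_lens_segments seq black → Spec_lens_segments seq black (lens_segments seq black)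

-- ===== LEMMAS AND PROOFS =====

-- length of the leading white run
def cntW (black : Int) (l : List Int) : Nat := (l.takeWhile (fun y => decide (black < y))).length

-- the run lengths of the maximal white runs of l, in order
def bRuns (black : Int) : List Int → List Int
  | [] => []
  | x :: xs =>
    if black < x then
      ((cntW black xs : Int) + 1) :: bRuns black (xs.dropWhile (fun y => decide (black < y)))
    else bRuns black xs
termination_by l => l.length
decreasing_by
  · have := List.length_dropWhile_le (fun y => decide (black < y)) xs; simp; omega
  · simp

-- structural restatement of A's loop over the remaining suffix (the dead i_last_white branch removed)
def aLoop (black : Int) : Int → List Int → List Int → List Int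
  | _, lw, [] => lw
  | before, lw, c :: rs =>
    if black < c then
      if black < before then aLoop black c (incLast lw 1) rs
      else aLoop black c (lw ++ [1]) rs
    else aLoop black c lw rs

theorem incLast_zero (lw : List Int) : incLast lw 0 = lw := by
  induction lw with
  | nil => rfl
  | cons x xs ih =>
    cases xs with
    | nil => simp [incLast]
    | cons y ys => simpa [incLast] using ih

theorem incLast_append_singleton (lw : List Int) (v n : Int) :
    incLast (lw ++ [v]) n = lw ++ [v + n] := by
  induction lw with
  | nil => rfl
  | cons x xs ih =>
    cases xs with
    | nil => simp [incLast]
    | cons y ys => simpa [incLast] using ih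

theorem incLast_incLast (lw : List Int) (m n : Int) :
    incLast (incLast lw m) n = incLast lw (m + n) := by
  rcases List.eq_nil_or_concat lw with h | ⟨l, v, h⟩
  · subst h; rfl
  · subst h
    rw [List.concat_eq_append]
    rw [incLast_append_singleton, incLast_append_singleton, incLast_append_singleton, add_assoc]

-- A's fold over range(1, len seq) equals the structural loop over the suffix
theorem fold_eq_aLoop (black : Int) (rest : List Int) :
    ∀ (pre : List Int) (lw : List Int) (before ilw : Int), ilw < (pre.length : Int) →
    ((PySem.List.pyRange (pre.length : Int) ((pre.length + rest.length : Nat) : Int) 1).foldl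
        (aStep (pre ++ rest) black) (lw, before, ilw)).1 = aLoop black before lw rest := by
  induction rest with
  | nil =>
    intro pre lw before ilw h
    rw [PySem.List.pyRange_one_eq_nil (by simp)]
    rfl
  | cons c rs ih =>
    intro pre lw before ilw h
    rw [PySem.List.pyRange_one_cons (by simp only [List.length_cons]; push_cast; omega)]
    have hget : PySem.List.pyGetD (pre ++ c :: rs) ((pre.length : Nat) : Int) 0 = c := by
      simp [PySem.List.pyGetD_natCast]
    have hstep : ∀ st : List Int × Int × Int,
        aStep (pre ++ c :: rs) black st (pre.length : Int) =
        (if black < c then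
           if black < st.2.1 then (incLast st.1 1, c, st.2.2)
           else if st.2.2 - (pre.length : Int) == 2 then (incLast st.1 2, c, (pre.length : Int))
           else (st.1 ++ [1], c, (pre.length : Int))
         else (st.1, c, st.2.2)) := by
      intro st; simp only [aStep, hget]
    have hb2 : (pre.length : Int) + 1 = (((pre ++ [c]).length : Nat) : Int) := by
      push_cast; simp
    have hb3 : ((pre.length + (c :: rs).length : Nat) : Int) = (((pre ++ [c]).length + rs.length : Nat) : Int) := by
      push_cast; simp; ring
    have harr : pre ++ c :: rs = (pre ++ [c]) ++ rs := by simp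
    simp only [List.foldl_cons, hstep]
    by_cases hc : black < c
    · by_cases hb : black < before
      · simp only [if_pos hc, if_pos hb]
        rw [hb2, hb3, harr, ih (pre ++ [c]) (incLast lw 1) c ilw (by push_cast; simp; omega)]
        simp [aLoop, hc, hb]
      · have hne : ¬ (ilw - (pre.length : Int) == 2) = true := by
          simp only [beq_iff_eq]; omega
        simp only [if_pos hc, if_neg hb, if_neg hne]
        rw [hb2, hb3, harr, ih (pre ++ [c]) (lw ++ [1]) c (pre.length : Int) (by push_cast; simp)]
        simp [aLoop, hc, hb]
    · simp only [if_neg hc]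
      rw [hb2, hb3, harr, ih (pre ++ [c]) lw c ilw (by push_cast; simp; omega)]
      simp [aLoop, hc]

-- aLoop in terms of bRuns
theorem aLoop_eq_bRuns (black : Int) (rest : List Int) :
    ∀ (lw : List Int) (before : Int),
    aLoop black before lw rest =
      if black < before then
        incLast lw (cntW black rest) ++ bRuns black (rest.dropWhile (fun y => decide (black < y)))
      else lw ++ bRuns black rest := by
  induction rest with
  | nil =>
    intro lw before
    by_cases hb : black < before <;> simp [aLoop, bRuns, cntW, hb, incLast_zero]
  | cons c rs ih =>
    intro lw before
    by_cases hc : black < c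
    · have h1 : cntW black (c :: rs) = cntW black rs + 1 := by
        simp [cntW, List.takeWhile_cons, hc]
      have h2 : List.dropWhile (fun y => decide (black < y)) (c :: rs)
          = List.dropWhile (fun y => decide (black < y)) rs := by
        simp [List.dropWhile_cons, hc]
      have hcast : ((cntW black rs + 1 : Nat) : Int) = 1 + (cntW black rs : Int) := by
        push_cast; ring
      by_cases hb : black < before
      · simp only [aLoop, if_pos hc, if_pos hb, ih, incLast_incLast, h1, h2, hcast]
      · simp only [aLoop, if_pos hc, if_neg hb, ih, h2]
        simp [bRuns, hc, incLast_append_singleton, add_comm, List.append_assoc]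
    · have h1 : cntW black (c :: rs) = 0 := by simp [cntW, List.takeWhile_cons, hc]
      have h2 : List.dropWhile (fun y => decide (black < y)) (c :: rs) = c :: rs := by
        simp [List.dropWhile_cons, hc]
      have h3 : bRuns black (c :: rs) = bRuns black rs := by simp [bRuns, hc]
      by_cases hb : black < before
      · simp only [aLoop, if_neg hc, ih, if_pos hb, h1, h2, h3]
        simp [incLast_zero]
      · simp only [aLoop, if_neg hc, ih, if_neg hb, h3]

-- bScan from index pre.length scans exactly the leading white run of the suffix
theorem bScan_spec (black : Int) (rest : List Int) :
    ∀ (pre : List Int), bScan (pre ++ rest) black pre.length = pre.length + cntW black rest := by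
  induction rest with
  | nil =>
    intro pre
    rw [bScan]
    simp [cntW]
  | cons c rs ih =>
    intro pre
    rw [bScan]
    have hi : pre.length < (pre ++ c :: rs).length := by simp
    have hg : (pre ++ c :: rs)[pre.length] = c := by
      rw [List.getElem_append_right (le_refl pre.length)]
      simp
    rw [dif_pos hi, hg]
    by_cases hc : black < c
    · have := ih (pre ++ [c])
      simp only [List.append_assoc, List.singleton_append, List.length_append,
        List.length_cons, List.length_nil] at this
      simp only [if_pos hc]
      rw [show pre.length + 1 = pre.length + [c].length by simp, show pre ++ c :: rs = (pre ++ [c]) ++ rs by simp,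
        show pre.length + [c].length = (pre ++ [c]).length by simp, ih (pre ++ [c])]
      simp [cntW, List.takeWhile_cons, hc]
      omega
    · simp only [if_neg hc]
      simp [cntW, List.takeWhile_cons, hc]

-- B's outer loop from index pre.length appends exactly the run lengths of the suffix
theorem bLoop_spec_aux (black : Int) (n : Nat) :
    ∀ (rest : List Int), rest.length ≤ n → ∀ (pre res : List Int),
    bLoop (pre ++ rest) black res pre.length = res ++ bRuns black rest := by
  induction n with
  | zero =>
    intro rest hn pre res
    have : rest = [] := List.eq_nil_of_length_eq_zero (by omega)
    subst this
    rw [bLoop]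
    simp [bRuns]
  | succ n ih =>
    intro rest hn pre res
    cases rest with
    | nil =>
      rw [bLoop]
      simp [bRuns]
    | cons c rs =>
      rw [bLoop]
      have hi : pre.length < (pre ++ c :: rs).length := by simp
      have hg : (pre ++ c :: rs)[pre.length] = c := by
        rw [List.getElem_append_right (le_refl pre.length)]
        simp
      rw [dif_pos hi, hg]
      by_cases hc : black < c
      · simp only [if_pos hc]
        have hscan : bScan (pre ++ c :: rs) black (pre.length + 1) = pre.length + 1 + cntW black rs := by
          have := bScan_spec black rs (pre ++ [c])
          simpa using this
        rw [hscan]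
        have hsplit : pre ++ c :: rs =
            (pre ++ c :: rs.takeWhile (fun y => decide (black < y))) ++ rs.dropWhile (fun y => decide (black < y)) := by
          simp [List.takeWhile_append_dropWhile]
        have hlen : pre.length + 1 + cntW black rs =
            (pre ++ c :: rs.takeWhile (fun y => decide (black < y))).length := by
          simp [cntW]; omega
        have hv : ((↑(pre.length + 1 + cntW black rs) : Int) - (pre.length : Int)) = (↑(cntW black rs) : Int) + 1 := by
          push_cast; ring
        have hdlen : (rs.dropWhile (fun y => decide (black < y))).length ≤ n := by
          have := List.length_dropWhile_le (fun y => decide (black < y)) rs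
          simp at hn; omega
        rw [hv, hlen]
        conv_lhs => rw [hsplit]
        rw [ih (rs.dropWhile (fun y => decide (black < y))) hdlen
            (pre ++ c :: rs.takeWhile (fun y => decide (black < y))) (res ++ [(↑(cntW black rs) : Int) + 1])]
        simp [bRuns, hc]
      · simp only [if_neg hc]
        have hrs : rs.length ≤ n := by simp at hn; omega
        have := ih rs hrs (pre ++ [c]) res
        simp only [List.append_assoc, List.singleton_append] at this
        rw [show pre.length + 1 = (pre ++ [c]).length by simp, this]
        simp [bRuns, hc]

theorem bLoop_spec (black : Int) (rest : List Int) :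
    ∀ (pre res : List Int), bLoop (pre ++ rest) black res pre.length = res ++ bRuns black rest :=
  bLoop_spec_aux black rest.length rest (le_refl _)

-- ===== VERDICT (by name: the statement is the Claim_ definition above) =====
theorem lens_segments_spec : Claim_equal_lens_segments := by
  intro seq black _hdom hpre
  unfold Spec_lens_segments
  cases seq with
  | nil => exact absurd rfl hpre
  | cons x xs =>
    unfold lens_segments lens_segments_alt
    simp only [PySem.List.pyGet?_zero_cons]
    have hb := bLoop_spec black (x :: xs) [] (if x > black then [] else [0])
    simp only [List.nil_append, List.length_nil] at hb
    have hlen : PySem.List.len (x :: xs) = ((([x] : List Int).length + xs.length : Nat) : Int) := by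
      simp [PySem.List.len_eq]; omega
    have hfold := fold_eq_aLoop black xs [x]
    rw [show ([x] : List Int) ++ xs = x :: xs from rfl] at hfold
    rw [hlen, hb]
    by_cases hc : x > black
    · simp only [if_pos hc]
      have h := hfold (incLast [0] 1) x 0 (by simp)
      rw [show ((([x] : List Int).length : Nat) : Int) = 1 from by simp] at h
      rw [h, aLoop_eq_bRuns, if_pos hc]
      simp [bRuns, hc, incLast]
      ring
    · simp only [if_neg hc]
      have h := hfold [0] x (-1) (by simp)
      rw [show ((([x] : List Int).length : Nat) : Int) = 1 from by simp] at h
      rw [h, aLoop_eq_bRuns, if_neg hc]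
      simp [bRuns, hc]
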